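-- pv_equiv track=rewrite | github.com/temevh/Algorithms-and-data-structures | W2/bitpairs.py | pairs
-- ===== SOURCE A (Python) =====
-- def pairs(s):
--     tavattu = [0 for i in range(256)]
--     etaisyys = [0 for i in range(256)]
--
--     for i in range(256):
--         tavattu[i] = 0
--         etaisyys[i] = 0
--
--     summa = 0
--
--     for i in range (len(s)):
--         if s[i]=="1":
--             summa += tavattu[ord(s[i])] * i - etaisyys[ord(s[i])]
--             tavattu[ord(s[i])] += 1
--             etaisyys[ord(s[i])] += i;
--
--     return(summa)
-- ===== SOURCE B (Python) =====
-- def pairs(s):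
--     positions = [i for i, c in enumerate(s) if c == "1"]
--     k = len(positions)
--     return sum(p * (2 * m - (k - 1)) for m, p in enumerate(positions))
-- ===== Notes on version B (the rewrite author's own statement) =====
-- stated objective: simpler
-- what changed: Replaces A's 256-slot count/running-sum streaming accumulation with a one-pass position list plus the arithmetic closed form sum(p*(2*m-(k-1))) over enumerated positions.
import Mathlib
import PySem

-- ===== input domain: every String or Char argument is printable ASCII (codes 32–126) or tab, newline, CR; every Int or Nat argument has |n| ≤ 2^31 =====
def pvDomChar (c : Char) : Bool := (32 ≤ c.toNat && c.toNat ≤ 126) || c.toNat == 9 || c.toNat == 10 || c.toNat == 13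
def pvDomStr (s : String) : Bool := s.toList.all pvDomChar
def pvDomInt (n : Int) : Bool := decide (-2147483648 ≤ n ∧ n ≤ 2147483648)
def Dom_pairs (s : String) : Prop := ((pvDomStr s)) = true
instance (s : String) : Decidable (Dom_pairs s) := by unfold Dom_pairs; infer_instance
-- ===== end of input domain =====

-- B replaces A's 256-slot streaming count/running-sum accumulation by a position list
-- plus an arithmetic closed form; objective: simpler.

-- ===== PORT A =====
-- body of A's main loop, one step per index i; s[i] via pyGetD (i is always in range here,
-- so the default is never used and the port is exact)
def pairsStepA (cs : List Char) (st : List Int × List Int × Int) (i : Int) :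
    List Int × List Int × Int :=
  let c := PySem.List.pyGetD cs i ' '
  if c = '1' then
    let tav := st.1
    let eta := st.2.1
    let summa := st.2.2 + tav.getD c.toNat 0 * i - eta.getD c.toNat 0
    (tav.set c.toNat (tav.getD c.toNat 0 + 1), eta.set c.toNat (eta.getD c.toNat 0 + i), summa)
  else st

def pairs (s : String) : Int :=
  let cs := s.toList
  let tavattu := (PySem.List.pyRange 0 256 1).map (fun _ => (0 : Int))
  let etaisyys := (PySem.List.pyRange 0 256 1).map (fun _ => (0 : Int))
  -- the (redundant) zeroing loop 'for i in range(256): tavattu[i]=0; etaisyys[i]=0'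
  let te := (PySem.List.pyRange 0 256 1).foldl
    (fun (te : List Int × List Int) i => (te.1.set i.toNat 0, te.2.set i.toNat 0))
    (tavattu, etaisyys)
  let st := (PySem.List.pyRange 0 (cs.length : Int) 1).foldl (pairsStepA cs) (te.1, te.2, 0)
  st.2.2

-- ===== PORT B =====
def pairs_alt (s : String) : Int :=
  let positions := ((PySem.List.enumerate s.toList 0).filter (fun p => p.2 == '1')).map (fun p => p.1)
  let k : Int := positions.length
  (PySem.List.enumerate positions 0).foldl (fun acc mp => acc + mp.2 * (2 * mp.1 - (k - 1))) 0

-- ===== PRECONDITION & SPEC =====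
def Spec_pairs (s : String) (out : Int) : Prop := out = pairs_alt s
instance (s : String) (out : Int) : Decidable (Spec_pairs s out) := by unfold Spec_pairs; infer_instance

-- ===== CLAIM (what is proved, stated in full; the proofs are below) =====
def Claim_equal_pairs : Prop := ∀ (s : String), Dom_pairs s → Spec_pairs s (pairs s)

-- ===== LEMMAS AND PROOFS =====

def z256 : List Int := (PySem.List.pyRange 0 256 1).map (fun _ => (0 : Int))

-- A's loop body viewed over enumerated (index, char) pairs
def stepAE (st : List Int × List Int × Int) (p : Int × Char) : List Int × List Int × Int :=
  let c := p.2
  if c = '1' then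
    let tav := st.1
    let eta := st.2.1
    let summa := st.2.2 + tav.getD c.toNat 0 * p.1 - eta.getD c.toNat 0
    (tav.set c.toNat (tav.getD c.toNat 0 + 1), eta.set c.toNat (eta.getD c.toNat 0 + p.1), summa)
  else st

-- scalar shadow of A's loop: only slot 49 (= ord '1') of the two arrays is ever touched
def stepS (st : Int × Int × Int) (p : Int × Char) : Int × Int × Int :=
  if p.2 = '1' then (st.1 + 1, st.2.1 + p.1, st.2.2 + st.1 * p.1 - st.2.1) else st

def ones (cs : List Char) : List Int :=
  ((PySem.List.enumerate cs 0).filter (fun p => p.2 == '1')).map (fun p => p.1)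

def bvalAux (P : List Int) (s K : Int) : Int :=
  match P with
  | [] => 0
  | p :: t => p * (2 * s - K) + bvalAux t (s + 1) K

lemma get49 (x : Int) : (z256.set 49 x)[49]? = some x := by
  apply List.getElem?_set_self
  simp [z256, PySem.List.pyRange_one]

set_option maxRecDepth 10000 in
lemma fold_zero : ((PySem.List.pyRange 0 256 1).foldl
    (fun (te : List Int × List Int) i => (te.1.set i.toNat 0, te.2.set i.toNat 0))
    ((PySem.List.pyRange 0 256 1).map (fun _ => (0 : Int)),
     (PySem.List.pyRange 0 256 1).map (fun _ => (0 : Int))))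
    = (z256.set 49 0, z256.set 49 0) := by decide

lemma stepAE_inv (p : Int × Char) (cnt sm acc : Int) :
    stepAE (z256.set 49 cnt, z256.set 49 sm, acc) p
      = (z256.set 49 (stepS (cnt, sm, acc) p).1,
         z256.set 49 (stepS (cnt, sm, acc) p).2.1,
         (stepS (cnt, sm, acc) p).2.2) := by
  obtain ⟨i, c⟩ := p
  by_cases hc : c = '1'
  · subst hc
    simp only [stepAE, stepS]
    have h49 : ('1').toNat = 49 := by decide
    simp [h49, get49, List.set_set, List.getD]
  · simp [stepAE, stepS, hc]

lemma foldAE_eq (L : List (Int × Char)) (cnt sm acc : Int) :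
    L.foldl stepAE (z256.set 49 cnt, z256.set 49 sm, acc)
      = (z256.set 49 (L.foldl stepS (cnt, sm, acc)).1,
         z256.set 49 (L.foldl stepS (cnt, sm, acc)).2.1,
         (L.foldl stepS (cnt, sm, acc)).2.2) := by
  induction L generalizing cnt sm acc with
  | nil => rfl
  | cons p t ih =>
    simp only [List.foldl_cons, stepAE_inv]
    rw [ih]

-- B's fold computes bvalAux
lemma foldB_eq (P : List Int) (s K a : Int) :
    (PySem.List.enumerate P s).foldl (fun acc mp => acc + mp.2 * (2 * mp.1 - K)) a
      = a + bvalAux P s K := by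
  induction P generalizing s a with
  | nil => simp [PySem.List.enumerate_nil, bvalAux]
  | cons p t ih =>
    rw [PySem.List.enumerate_cons]
    simp only [List.foldl_cons, bvalAux]
    rw [ih]
    ring

lemma bvalAux_shift (P : List Int) (s K : Int) :
    bvalAux P s (K + 1) = bvalAux P s K - P.sum := by
  induction P generalizing s with
  | nil => simp [bvalAux]
  | cons p t ih =>
    simp only [bvalAux, List.sum_cons]
    rw [ih]
    ring

lemma bvalAux_append (P : List Int) (n s K : Int) :
    bvalAux (P ++ [n]) s K = bvalAux P s K + n * (2 * (s + P.length) - K) := by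
  induction P generalizing s with
  | nil => simp [bvalAux]
  | cons p t ih =>
    simp only [List.cons_append, bvalAux, List.length_cons]
    rw [ih]
    push_cast
    ring

def bval (P : List Int) : Int := bvalAux P 0 ((P.length : Int) - 1)

lemma ones_append_one (cs : List Char) :
    ones (cs ++ ['1']) = ones cs ++ [(cs.length : Int)] := by
  unfold ones
  rw [PySem.List.enumerate_append, List.filter_append, List.map_append]
  congr 1
  simp [PySem.List.enumerate_cons, PySem.List.enumerate_nil]

lemma ones_append_ne (cs : List Char) (c : Char) (hc : c ≠ '1') :
    ones (cs ++ [c]) = ones cs := by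
  unfold ones
  rw [PySem.List.enumerate_append, List.filter_append, List.map_append]
  simp [PySem.List.enumerate_cons, PySem.List.enumerate_nil, hc]

lemma foldS_spec (cs : List Char) :
    (PySem.List.enumerate cs 0).foldl stepS (0, 0, 0)
      = (((ones cs).length : Int), (ones cs).sum, bval (ones cs)) := by
  induction cs using List.reverseRecOn with
  | nil => rfl
  | append_singleton t c ih =>
    rw [PySem.List.enumerate_append, List.foldl_append, ih]
    by_cases hc : c = '1'
    · subst hc
      rw [ones_append_one]
      set P := ones t with hP
      set k : Int := (P.length : Int) with hk
      have hstep : List.foldl stepS (k, P.sum, bval P)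
          (PySem.List.enumerate ['1'] (0 + (t.length : Int)))
          = (k + 1, P.sum + (t.length : Int), bval P + k * (t.length : Int) - P.sum) := by
        simp [PySem.List.enumerate_cons, PySem.List.enumerate_nil, stepS]
      rw [hstep]
      have hlen : (((P ++ [(t.length : Int)]).length : Int)) = k + 1 := by
        simp [hk]
      have hsum : (P ++ [(t.length : Int)]).sum = P.sum + (t.length : Int) := by simp
      have hb : bval (P ++ [(t.length : Int)]) = bval P + k * (t.length : Int) - P.sum := by
        unfold bval
        rw [hlen, show k + 1 - 1 = k from by ring, bvalAux_append]
        have h2 := bvalAux_shift P 0 (k - 1)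
        rw [show k - 1 + 1 = k from by ring] at h2
        rw [h2, ← hk]
        ring
      rw [hlen, hsum, hb]
    · rw [ones_append_ne t c hc]
      simp [PySem.List.enumerate_cons, PySem.List.enumerate_nil, stepS, hc]

lemma pairs_key (cs : List Char) (te : List Int × List Int)
    (hte : te = (z256.set 49 0, z256.set 49 0)) :
    ((PySem.List.pyRange 0 (cs.length : Int) 1).foldl (pairsStepA cs) (te.1, te.2, 0)).2.2
      = (PySem.List.enumerate (ones cs) 0).foldl
          (fun acc mp => acc + mp.2 * (2 * mp.1 - (((ones cs).length : Int) - 1))) 0 := by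
  subst hte
  have hA : (PySem.List.pyRange 0 (cs.length : Int) 1).foldl (pairsStepA cs)
      (z256.set 49 0, z256.set 49 0, 0)
      = (PySem.List.enumerate cs 0).foldl stepAE (z256.set 49 0, z256.set 49 0, 0) := by
    rw [PySem.List.enumerate_eq_map_pyRange cs ' ', List.foldl_map]
    rfl
  show ((PySem.List.pyRange 0 (cs.length : Int) 1).foldl (pairsStepA cs)
      (z256.set 49 0, z256.set 49 0, 0)).2.2 = _
  rw [hA, foldAE_eq, foldS_spec, foldB_eq]
  simp [bval]

-- ===== VERDICT (by name: the statement is the Claim_ definition above) =====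
theorem pairs_spec : Claim_equal_pairs := by
  intro s _
  show pairs s = pairs_alt s
  exact pairs_key s.toList _ fold_zero
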